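-- pv_equiv track=rewrite | github.com/Moecker/samo_tidy | support/sort_python_source.py | get_includes
-- ===== SOURCE A (Python) =====
-- def get_includes(lines):
--     clusters = []
--     clusters_idx = 0
--     clusters.append([])
--     for i, line in enumerate(lines):
--         if line.startswith("from") or line.startswith("import"):
--             clusters[clusters_idx].append((line, i))
--         if line == "\n":
--             clusters_idx += 1
--             clusters.append([])
--     return clusters
-- ===== SOURCE B (Python) =====
-- def get_includes(lines):
--     # Recursive: cut the list at the first "\n" found via index(), slice, recurse.
--     def imports(seg, base):
--         return [(l, base + k) for k, l in enumerate(seg) if l.startswith(("from", "import"))]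
--
--     def go(rest, base):
--         if "\n" not in rest:
--             return [imports(rest, base)]
--         j = rest.index("\n")
--         return [imports(rest[:j], base)] + go(rest[j + 1:], base + j + 1)
--
--     return go(lines, 0)
-- ===== Notes on version B (the rewrite author's own statement) =====
-- stated objective: alternative
-- what changed: B is recursive divide-at-delimiter: it locates the first blank line with list.index, slices the list there, filters the head slice for from/import lines (with index offset arithmetic), and recurses on the tail slice, instead of A's single streaming loop that maintains a running cluster index into a growing list of clusters.
import Mathlib
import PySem

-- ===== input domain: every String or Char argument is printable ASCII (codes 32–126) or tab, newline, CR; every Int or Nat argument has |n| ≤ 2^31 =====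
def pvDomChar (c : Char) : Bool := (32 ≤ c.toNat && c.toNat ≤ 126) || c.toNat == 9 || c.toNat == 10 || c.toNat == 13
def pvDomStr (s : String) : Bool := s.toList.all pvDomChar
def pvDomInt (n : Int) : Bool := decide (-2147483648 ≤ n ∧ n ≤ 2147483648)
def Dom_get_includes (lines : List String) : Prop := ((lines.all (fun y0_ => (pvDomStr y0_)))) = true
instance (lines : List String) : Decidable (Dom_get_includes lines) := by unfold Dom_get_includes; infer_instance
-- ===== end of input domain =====

-- B replaces A's single streaming loop (running cluster index into a growing list)
-- by a recursive divide-at-delimiter algorithm: find the first "\n" with index(),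
-- slice, filter the head segment, recurse on the tail. Same cost; objective: alternative.

-- ===== PORT A =====
-- one loop iteration of A: maybe append (line, i) to clusters[idx], then maybe open a new cluster
def stepA (st : List (List (String × Int)) × Nat) (p : Int × String) :
    List (List (String × Int)) × Nat :=
  let clusters :=
    if PySem.Str.startswith p.2 "from" || PySem.Str.startswith p.2 "import" then
      st.1.modify st.2 (fun c => c ++ [(p.2, p.1)])
    else st.1
  if p.2 == "\n" then (clusters ++ [[]], st.2 + 1) else (clusters, st.2)

def get_includes (lines : List String) : List (List (String × Int)) :=
  ((PySem.List.enumerate lines).foldl stepA ([[]], 0)).1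

-- ===== PORT B =====
-- imports(seg, base): the from/import lines of a segment, indices offset by base
def impB (seg : List String) (base : Int) : List (String × Int) :=
  (PySem.List.enumerate seg).filterMap (fun p =>
    if PySem.Str.startswith p.2 "from" || PySem.Str.startswith p.2 "import"
    then some (p.2, base + p.1) else none)

-- go(rest, base): cut at the first "\n" (list.index), filter head slice, recurse on tail slice
def goB (rest : List String) (base : Int) : List (List (String × Int)) :=
  match h : PySem.List.index? rest "\n" with
  | none => [impB rest base]
  | some j =>
      impB (PySem.List.slice rest (some 0) (some (j : Int))) base ::
        goB (PySem.List.slice rest (some ((j : Int) + 1)) (some (rest.length : Int))) (base + j + 1)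
termination_by rest.length
decreasing_by
  obtain ⟨pre, suf, hsplit, -, -⟩ := (PySem.List.index?_eq_some_iff _ _ _).1 h
  have : ((j : Int) + 1) = ((j + 1 : Nat) : Int) := by push_cast; ring
  rw [this, PySem.List.slice_natCast]
  subst hsplit
  simp [List.length_take, List.length_drop]

def get_includes_alt (lines : List String) : List (List (String × Int)) :=
  goB lines 0

-- ===== PRECONDITION & SPEC =====
def Spec_get_includes (lines : List String) (out : List (List (String × Int))) : Prop := out = get_includes_alt lines
instance (lines : List String) (out : List (List (String × Int))) : Decidable (Spec_get_includes lines out) := by unfold Spec_get_includes; infer_instance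

-- ===== CLAIM =====
def Claim_equal_get_includes : Prop := ∀ (lines : List String), Dom_get_includes lines → Spec_get_includes lines (get_includes lines)

-- ===== LEMMAS AND PROOFS =====

-- prepend cur to the first cluster
def consHead (cur : List (String × Int)) : List (List (String × Int)) → List (List (String × Int))
  | [] => [cur]
  | c :: cs => (cur ++ c) :: cs

def swB (s : String) : Bool := PySem.Str.startswith s "from" || PySem.Str.startswith s "import"

-- common specification over enumerated pairs
def specP : List (Int × String) → List (List (String × Int))
  | [] => [[]]
  | (i, s) :: t =>
    if s == "\n" then [] :: specP t
    else if swB s then consHead [(s, i)] (specP t) else specP t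

def filtP (l : List (Int × String)) : List (String × Int) :=
  l.filterMap (fun p => if swB p.2 then some (p.2, p.1) else none)

theorem consHead_consHead (a b : List (String × Int)) (l : List (List (String × Int))) :
    consHead a (consHead b l) = consHead (a ++ b) l := by
  cases l <;> simp [consHead]

theorem specP_ne_nil (l : List (Int × String)) : specP l ≠ [] := by
  match l with
  | [] => simp [specP]
  | (i, s) :: t =>
    unfold specP
    split_ifs
    · simp
    · cases h : specP t <;> simp [consHead]
    · exact specP_ne_nil t

theorem consHead_nil (l : List (Int × String)) : consHead [] (specP l) = specP l := by
  cases h : specP l with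
  | nil => exact absurd h (specP_ne_nil l)
  | cons c cs => simp [consHead]

theorem modify_last {α : Type} (xs : List α) (y : α) (f : α → α) :
    (xs ++ [y]).modify xs.length f = xs ++ [f y] := by
  induction xs with
  | nil => rfl
  | cons x xs ih => simpa [List.modify] using ih

theorem A_loop (l : List (Int × String))
    (done : List (List (String × Int))) (cur : List (String × Int)) :
    (l.foldl stepA (done ++ [cur], done.length)).1 = done ++ consHead cur (specP l) := by
  induction l generalizing done cur with
  | nil => simp [specP, consHead]
  | cons p rest ih =>
    obtain ⟨i, s⟩ := p
    simp only [List.foldl_cons, stepA, specP]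
    by_cases hnl : s = "\n"
    · subst hnl
      have hsw : (PySem.Str.startswith "\n" "from" || PySem.Str.startswith "\n" "import") = false := by
        decide
      simp only [hsw, Bool.false_eq_true, if_false, beq_self_eq_true, if_true]
      have h2 : done.length + 1 = (done ++ [cur]).length := by simp
      rw [h2, ih (done ++ [cur]) [], consHead_nil]
      simp [consHead]
    · have hne : (s == "\n") = false := by simp [hnl]
      cases hb : swB s with
      | false =>
        have hb' : (PySem.Str.startswith s "from" || PySem.Str.startswith s "import") = false := by
          simpa [swB] using hb
        simp only [hb', hne, Bool.false_eq_true, if_false]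
        rw [ih done cur]
      | true =>
        have hb' : (PySem.Str.startswith s "from" || PySem.Str.startswith s "import") = true := by
          simpa [swB] using hb
        simp only [hb', hne, Bool.false_eq_true, if_false, if_true, modify_last]
        rw [ih done (cur ++ [(s, i)]), consHead_consHead]

theorem A_eq_specP (lines : List String) :
    get_includes lines = specP (PySem.List.enumerate lines) := by
  have := A_loop (PySem.List.enumerate lines) [] []
  simpa [get_includes, consHead_nil] using this

theorem impB_shift (seg : List String) (base : Int) :
    ∀ s : Int,
      (PySem.List.enumerate seg s).filterMap (fun p =>
        if swB p.2 then some (p.2, base + p.1) else none)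
      = filtP (PySem.List.enumerate seg (base + s)) := by
  induction seg generalizing base with
  | nil => intro s; simp [PySem.List.enumerate_nil, filtP]
  | cons x t ih =>
    intro s
    rw [PySem.List.enumerate_cons, PySem.List.enumerate_cons]
    have hshift : base + s + 1 = base + (s + 1) := by ring
    cases hb : swB x <;>
      simp [filtP, hb, hshift, ih base (s + 1)]

theorem impB_eq (seg : List String) (base : Int) :
    impB seg base = filtP (PySem.List.enumerate seg base) := by
  have h := impB_shift seg base 0
  simp only [swB] at h
  simpa [impB] using h

theorem specP_noNL (seg : List String) :
    "\n" ∉ seg → ∀ base : Int,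
      specP (PySem.List.enumerate seg base) = [filtP (PySem.List.enumerate seg base)] := by
  induction seg with
  | nil => intro _ base; simp [PySem.List.enumerate_nil, specP, filtP]
  | cons x t ih =>
    intro hmem base
    have hx : x ≠ "\n" := fun h => hmem (h ▸ List.mem_cons_self ..)
    have ht : "\n" ∉ t := fun h => hmem (List.mem_cons_of_mem _ h)
    rw [PySem.List.enumerate_cons]
    simp only [specP, filtP, List.filterMap_cons]
    have hne : (x == "\n") = false := by simp [hx]
    rw [hne]
    simp only [Bool.false_eq_true, if_false]
    cases hb : swB x <;>
      simp [ih ht (base + 1), filtP, consHead]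

theorem specP_split (l1 : List (Int × String)) (m : Int) (l2 : List (Int × String))
    (h : ∀ p ∈ l1, p.2 ≠ "\n") :
    specP (l1 ++ (m, "\n") :: l2) = filtP l1 :: specP l2 := by
  induction l1 with
  | nil => simp [specP, filtP]
  | cons p t ih =>
    obtain ⟨i, s⟩ := p
    have hs : s ≠ "\n" := h (i, s) (List.mem_cons_self ..)
    have ht : ∀ q ∈ t, q.2 ≠ "\n" := fun q hq => h q (List.mem_cons_of_mem _ hq)
    simp only [List.cons_append, specP, filtP, List.filterMap_cons]
    have hne : (s == "\n") = false := by simp [hs]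
    rw [hne]
    simp only [Bool.false_eq_true, if_false]
    cases hb : swB s <;> simp [ih ht, filtP, consHead]

theorem B_loop : ∀ (n : Nat) (rest : List String), rest.length ≤ n → ∀ base : Int,
    goB rest base = specP (PySem.List.enumerate rest base) := by
  intro n
  induction n with
  | zero =>
    intro rest hlen base
    have : rest = [] := List.eq_nil_of_length_eq_zero (Nat.le_zero.1 hlen)
    subst this
    unfold goB
    simp [PySem.List.index?_eq_idxOf?, PySem.List.enumerate_nil, specP, impB]
  | succ n ih =>
    intro rest hlen base
    unfold goB
    cases h : PySem.List.index? rest "\n" with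
    | none =>
      have hmem : "\n" ∉ rest := (PySem.List.index?_eq_none_iff _ _).1 h
      simp only []
      rw [specP_noNL rest hmem base, impB_eq]
    | some j =>
      simp only []
      obtain ⟨pre, suf, hsplit, hlenp, hpre⟩ := (PySem.List.index?_eq_some_iff _ _ _).1 h
      have hc1 : ((j : Int) + 1) = ((j + 1 : Nat) : Int) := by push_cast; ring
      have hs1 : PySem.List.slice rest (some (0 : Int)) (some (j : Int)) = pre := by
        have h0 : ((0 : Int)) = ((0 : Nat) : Int) := rfl
        rw [h0, PySem.List.slice_natCast, hsplit]
        simp [List.drop_zero, hlenp]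
      have hs2 : PySem.List.slice rest (some ((j : Int) + 1)) (some (rest.length : Int)) = suf := by
        rw [hc1, PySem.List.slice_natCast, hsplit]
        have : (pre ++ "\n" :: suf).drop (j + 1) = suf := by
          rw [← hlenp]
          simp [List.drop_append]
        rw [this]
        have : (pre ++ "\n" :: suf).length - (j + 1) = suf.length := by
          simp [← hlenp]; omega
        rw [this, List.take_length]
      have hsuflen : suf.length ≤ n := by
        subst hsplit
        simp at hlen
        omega
      rw [hs1, hs2, ih suf hsuflen (base + j + 1), hsplit,
        PySem.List.enumerate_append, PySem.List.enumerate_cons]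
      have hpp : ∀ p ∈ PySem.List.enumerate pre base, p.2 ≠ "\n" := by
        intro p hp
        obtain ⟨k, hk, rfl⟩ := (PySem.List.mem_enumerate_iff _ _ _).1 hp
        intro hc
        exact hpre (hc ▸ List.getElem_mem hk)
      rw [specP_split _ _ _ hpp, impB_eq]
      have : base + (pre.length : Int) + 1 = base + (j : Int) + 1 := by rw [hlenp]
      rw [this]

-- ===== VERDICT =====
theorem get_includes_spec : Claim_equal_get_includes := by
  intro lines _
  show get_includes lines = get_includes_alt lines
  rw [A_eq_specP, get_includes_alt, B_loop lines.length lines (le_refl _) 0]
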